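-- pv_equiv track=rewrite | github.com/MuongKimhong/SpaceX-rocket | rocket.py | draw_rocket
-- ===== SOURCE A (Python) =====
-- def draw_rocket(rocket) -> str:
--     center_index = 30
--     point_from_center = 0
--
--     for d in range(25): # down direction
--         rocket = rocket + "\n"
--
--         for i in range(60): # right direction
--             if d == 0:
--                 if i != center_index:
--                     rocket = rocket + " "
--                 else:
--                     rocket = rocket + "*"
--             elif d == 1:
--                 if (i != center_index - 1) and (i != center_index + 1) and (i != center_index):
--                     rocket = rocket + " "
--                 else:
--                     rocket = rocket + "*"
--
--             if d >= 2:
--                 if d >= 2 and d < 6: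
--                     point_from_center = d
--                 elif d >= 6 and d < 20:
--                     point_from_center = 5
--                 elif d >= 20 :
--                     point_from_center = 7
--
--                 if (i < center_index - point_from_center) or (i > center_index + point_from_center):
--                     rocket = rocket + " "
--                 else:
--                     rocket = rocket + "*"
--     return rocket
-- ===== SOURCE B (Python) =====
-- def draw_rocket(rocket) -> str:
--     rows = []
--     for d in range(25):
--         p = 0 if d == 0 else 1 if d == 1 else d if d < 6 else 5 if d < 20 else 7
--         rows.append("\n" + " " * (30 - p) + "*" * (2 * p + 1) + " " * (29 - p))
--     return rocket + "".join(rows)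
-- ===== Notes on version B (the rewrite author's own statement) =====
-- stated objective: simpler
-- what changed: B builds each of the 25 rows in one shot by run-length string multiplication from a closed-form half-width p(d) and joins them, instead of A's nested 25x60 per-cell loop with star/space conditionals.
import Mathlib
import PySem

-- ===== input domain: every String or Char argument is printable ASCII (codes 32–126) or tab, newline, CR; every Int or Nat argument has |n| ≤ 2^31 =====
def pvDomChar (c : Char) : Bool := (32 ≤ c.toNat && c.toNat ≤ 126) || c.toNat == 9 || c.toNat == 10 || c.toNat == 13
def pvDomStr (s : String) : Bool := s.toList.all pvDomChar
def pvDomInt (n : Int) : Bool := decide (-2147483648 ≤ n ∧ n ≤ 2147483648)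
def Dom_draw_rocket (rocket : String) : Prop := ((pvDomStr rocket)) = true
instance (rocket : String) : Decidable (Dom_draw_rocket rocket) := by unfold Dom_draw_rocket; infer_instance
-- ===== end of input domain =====

-- B builds each of the 25 rows in one shot by run-length string multiplication from a
-- closed-form half-width, instead of A's nested 25x60 per-cell star/space conditionals.

-- ===== PORT A =====
-- one inner-loop iteration of A (state: the accumulated string and point_from_center)
def aCell (d : Int) (st : String × Int) (i : Int) : String × Int :=
  let st :=
    if d = 0 then
      (if i ≠ 30 then (st.1 ++ " ", st.2) else (st.1 ++ "*", st.2))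
    else if d = 1 then
      (if i ≠ 30 - 1 ∧ i ≠ 30 + 1 ∧ i ≠ 30 then (st.1 ++ " ", st.2) else (st.1 ++ "*", st.2))
    else st
  if d ≥ 2 then
    let p : Int :=
      if d ≥ 2 ∧ d < 6 then d
      else if d ≥ 6 ∧ d < 20 then 5
      else if d ≥ 20 then 7
      else st.2
    if i < 30 - p ∨ i > 30 + p then (st.1 ++ " ", p) else (st.1 ++ "*", p)
  else st

-- one outer-loop iteration of A: append "\n" then run the 60-column loop
def aRow (st : String × Int) (d : Int) : String × Int :=
  (PySem.List.pyRange 0 60 1).foldl (aCell d) (st.1 ++ "\n", st.2)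

def draw_rocket (rocket : String) : String :=
  ((PySem.List.pyRange 0 25 1).foldl aRow (rocket, 0)).1

-- ===== PORT B =====
def altRow (d : Int) : String :=
  let p : Int := if d = 0 then 0 else if d = 1 then 1 else if d < 6 then d
                 else if d < 20 then 5 else 7
  "\n" ++ String.ofList (List.replicate (30 - p).toNat ' ')
       ++ String.ofList (List.replicate (2 * p + 1).toNat '*')
       ++ String.ofList (List.replicate (29 - p).toNat ' ')

def draw_rocket_alt (rocket : String) : String :=
  rocket ++ String.join ((PySem.List.pyRange 0 25 1).map altRow)

-- ===== PRECONDITION & SPEC =====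
def Spec_draw_rocket (rocket : String) (out : String) : Prop := out = draw_rocket_alt rocket
instance (rocket : String) (out : String) : Decidable (Spec_draw_rocket rocket out) := by unfold Spec_draw_rocket; infer_instance

-- ===== CLAIM (what is proved, stated in full; the proofs are below) =====
def Claim_equal_draw_rocket : Prop := ∀ (rocket : String), Dom_draw_rocket rocket → Spec_draw_rocket rocket (draw_rocket rocket)

-- ===== LEMMAS AND PROOFS =====
theorem aCell_shift (d : Int) (s : String) (p : Int) (i : Int) :
    aCell d (s, p) i = (s ++ (aCell d ("", p) i).1, (aCell d ("", p) i).2) := by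
  unfold aCell
  split_ifs <;> simp_all <;> split_ifs <;> simp_all

theorem foldl_aCell_shift (d : Int) (l : List Int) (s : String) (p : Int) :
    l.foldl (aCell d) (s, p)
      = (s ++ (l.foldl (aCell d) ("", p)).1, (l.foldl (aCell d) ("", p)).2) := by
  induction l generalizing s p with
  | nil => simp
  | cons x xs ih =>
    simp only [List.foldl_cons]
    rw [aCell_shift, ih, ih ((aCell d ("", p) x).1)]
    simp [String.append_assoc]

theorem aRow_shift (s : String) (p : Int) (d : Int) :
    aRow (s, p) d = (s ++ (aRow ("", p) d).1, (aRow ("", p) d).2) := by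
  unfold aRow
  rw [foldl_aCell_shift, foldl_aCell_shift _ _ ("" ++ "\n")]
  simp [String.append_assoc]

theorem foldl_aRow_shift (l : List Int) (s : String) (p : Int) :
    l.foldl aRow (s, p)
      = (s ++ (l.foldl aRow ("", p)).1, (l.foldl aRow ("", p)).2) := by
  induction l generalizing s p with
  | nil => simp
  | cons x xs ih =>
    simp only [List.foldl_cons]
    rw [aRow_shift, ih, ih ((aRow ("", p) x).1)]
    simp [String.append_assoc]

theorem draw_rocket_shift (rocket : String) :
    draw_rocket rocket = rocket ++ draw_rocket "" := by
  unfold draw_rocket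
  rw [foldl_aRow_shift]

set_option maxRecDepth 100000 in
set_option maxHeartbeats 4000000 in
theorem draw_rocket_nil : draw_rocket "" = draw_rocket_alt "" := by decide

-- ===== VERDICT (by name: the statement is the Claim_ definition above) =====
theorem draw_rocket_spec : Claim_equal_draw_rocket := by
  intro rocket _
  unfold Spec_draw_rocket
  rw [draw_rocket_shift, draw_rocket_nil]
  simp [draw_rocket_alt]
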